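-- pv_equiv track=rewrite | github.com/Looomo/RLUtils | RLUtils/dataset_utils.py | determain_env
-- ===== SOURCE A (Python) =====
-- meta_infos = {
--     "maze2d": {
--         'tasks': ['maze2d'],
--         'datasets':["umaze", "medium", "large"], # "umaze-dense", "medium-dense", "large-dense"],
--         "versions":["v1"],
--         "sparse": "Sparse except dense",
--         "observshape": ""
--     },
--     "antmaze": {
--         'tasks':['antmaze'],
--         'datasets':["umaze", "umaze-diverse", "medium-diverse","medium-play", "large-diverse", "large-play"],
--         "versions":["v0"],
--         "sparse": "Sparse"
--     },
--     "adroit": {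
--         'tasks': ['pen', 'hammer', 'door', 'relocate'],
--         'datasets':['human', 'cloned', 'expert'],
--         "versions":["v1"],
--         "sparse": "Dense"
--     },
--     "gym": {
--         'tasks': ['halfcheetah', 'walker2d', 'hopper', 'ant'],
--         'datasets':['random', 'medium', 'expert', 'medium-expert', 'medium-replay'],
--         "versions":["v2"],
--         "sparse": "Dense"
--     },
--     "frankakitchen": {
--         'tasks': ['kitchen'],
--         'datasets':['complete', 'partial', 'mixed'],
--         "versions":["v0"],
--         "sparse": "Dense"
--     },
--     "calvin": {
--         'tasks': ['calvin'],
--         'datasets':[''],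
--         "versions":[''],
--         "sparse": "All zero. No reward at all."
--     },
-- }
--
-- def determain_env(env_full_name):
--     # base_task = env_full_name.split("-")[0]
--     # what_env_is_it = {
--     #     'maze2d': 'maze2d' in env_full_name,
--     #     'antmaze': 'antmaze-' in env_full_name,
--     #     'adroit': 'pen-' in env_full_name or 'hammer-' in env_full_name or 'door-' in env_full_name or 'relocate-' in env_full_name,
--     #     'gym': base_task in meta_infos['gym'],
--     #     'kitchen': 'kitchen' in env_full_name
--     # }
--     what_env_is_it = {
--         "__UNKNOWN_ENV__": True
--     }
--     for env_type in meta_infos.keys():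
--         is_env_type = determain_env_type_match( env_full_name,env_type  )
--         what_env_is_it[env_type] = is_env_type
--         if is_env_type: what_env_is_it["__UNKNOWN_ENV__"] = False
--     return what_env_is_it
--
-- def determain_env_type_match(env_full_name, env_type: str):
--     # if env_type not in meta_infos.keys():
--     #     print
--     assert env_type in meta_infos.keys(), f"env_type must be selected from: { meta_infos.keys()}"
--     base_task = env_full_name.split("-")[0]
--     return base_task in meta_infos[env_type]['tasks']
-- ===== SOURCE B (Python) =====
-- # B: one reverse-index lookup (task -> env_type) instead of a per-type matching loop; same dict keys/order.
-- meta_infos = {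
--     "maze2d": {'tasks': ['maze2d']},
--     "antmaze": {'tasks': ['antmaze']},
--     "adroit": {'tasks': ['pen', 'hammer', 'door', 'relocate']},
--     "gym": {'tasks': ['halfcheetah', 'walker2d', 'hopper', 'ant']},
--     "frankakitchen": {'tasks': ['kitchen']},
--     "calvin": {'tasks': ['calvin']},
-- }
--
-- _REVERSE_INDEX = {task: env_type
--                   for env_type, info in meta_infos.items()
--                   for task in info['tasks']}
--
-- def determain_env(env_full_name):
--     base_task = env_full_name.split("-")[0]
--     result = {
--         "__UNKNOWN_ENV__": True,
--         "maze2d": False,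
--         "antmaze": False,
--         "adroit": False,
--         "gym": False,
--         "frankakitchen": False,
--         "calvin": False,
--     }
--     env_type = _REVERSE_INDEX.get(base_task)
--     if env_type is not None:
--         result[env_type] = True
--         result["__UNKNOWN_ENV__"] = False
--     return result
-- ===== Notes on version B (the rewrite author's own statement) =====
-- stated objective: faster
-- what changed: Replaced the loop that calls a per-type matcher (each scanning that type's task list) with a single precomputed reverse-index lookup task->env_type into a literal result dict.
import Mathlib
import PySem

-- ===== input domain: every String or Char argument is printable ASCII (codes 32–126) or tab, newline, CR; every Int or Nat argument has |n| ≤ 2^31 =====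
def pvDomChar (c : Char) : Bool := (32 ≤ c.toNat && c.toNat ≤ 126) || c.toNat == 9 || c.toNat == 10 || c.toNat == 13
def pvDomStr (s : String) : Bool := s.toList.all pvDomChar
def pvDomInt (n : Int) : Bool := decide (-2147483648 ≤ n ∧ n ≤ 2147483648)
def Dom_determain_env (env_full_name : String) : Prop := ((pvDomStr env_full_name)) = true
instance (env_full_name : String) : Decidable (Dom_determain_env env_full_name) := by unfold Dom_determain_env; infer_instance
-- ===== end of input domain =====

-- B replaces A's per-type matcher loop with one reverse-index lookup; same output dict.

-- ===== PORT A =====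
-- meta_infos restricted to the 'tasks' field, the only one A reads
def pvMetaTasks : PySem.Dict String (List String) := PySem.Dict.mk
  [("maze2d", ["maze2d"]),
   ("antmaze", ["antmaze"]),
   ("adroit", ["pen", "hammer", "door", "relocate"]),
   ("gym", ["halfcheetah", "walker2d", "hopper", "ant"]),
   ("frankakitchen", ["kitchen"]),
   ("calvin", ["calvin"])]

-- assert is always true (env_type is drawn from meta_infos.keys()), so it is omitted
def determain_env_type_match (env_full_name : String) (env_type : String) : Bool :=
  let base_task := ((PySem.List.pyGet? ((PySem.Str.split? env_full_name "-").getD []) 0)).getD ""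
  (pvMetaTasks.getD env_type []).contains base_task

def determain_env (env_full_name : String) : List (String × Bool) :=
  (pvMetaTasks.keys.foldl
    (fun d env_type =>
      let is_env_type := determain_env_type_match env_full_name env_type
      let d := d.insert env_type is_env_type
      if is_env_type then d.insert "__UNKNOWN_ENV__" false else d)
    (PySem.Dict.mk [("__UNKNOWN_ENV__", true)])).items

-- ===== PORT B =====
def pvRevIndex : PySem.Dict String String := PySem.Dict.mk
  [("maze2d", "maze2d"), ("antmaze", "antmaze"),
   ("pen", "adroit"), ("hammer", "adroit"), ("door", "adroit"), ("relocate", "adroit"),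
   ("halfcheetah", "gym"), ("walker2d", "gym"), ("hopper", "gym"), ("ant", "gym"),
   ("kitchen", "frankakitchen"), ("calvin", "calvin")]

def determain_env_alt (env_full_name : String) : List (String × Bool) :=
  let base_task := ((PySem.List.pyGet? ((PySem.Str.split? env_full_name "-").getD []) 0)).getD ""
  let result : PySem.Dict String Bool := PySem.Dict.mk
    [("__UNKNOWN_ENV__", true), ("maze2d", false), ("antmaze", false), ("adroit", false),
     ("gym", false), ("frankakitchen", false), ("calvin", false)]
  (match pvRevIndex.get? base_task with
   | some env_type => (result.insert env_type true).insert "__UNKNOWN_ENV__" false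
   | none => result).items

-- ===== PRECONDITION & SPEC =====
def Spec_determain_env (env_full_name : String) (out : List (String × Bool)) : Prop := out = determain_env_alt env_full_name
instance (env_full_name : String) (out : List (String × Bool)) : Decidable (Spec_determain_env env_full_name out) := by unfold Spec_determain_env; infer_instance

-- ===== CLAIM (what is proved, stated in full; the proofs are below) =====
def Claim_equal_determain_env : Prop := ∀ (env_full_name : String), Dom_determain_env env_full_name → Spec_determain_env env_full_name (determain_env env_full_name)

-- ===== LEMMAS AND PROOFS =====

-- Both ports, viewed as a function of the extracted base task only, agree for every base string.
set_option maxRecDepth 40000 in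
lemma determain_core (b : String) :
    (pvMetaTasks.keys.foldl
      (fun d env_type =>
        let is_env_type := (pvMetaTasks.getD env_type []).contains b
        let d := d.insert env_type is_env_type
        if is_env_type then d.insert "__UNKNOWN_ENV__" false else d)
      (PySem.Dict.mk [("__UNKNOWN_ENV__", true)])).items =
    (match pvRevIndex.get? b with
     | some env_type =>
        ((PySem.Dict.mk
          [("__UNKNOWN_ENV__", true), ("maze2d", false), ("antmaze", false), ("adroit", false),
           ("gym", false), ("frankakitchen", false), ("calvin", false)]).insert env_type true
          ).insert "__UNKNOWN_ENV__" false
     | none => PySem.Dict.mk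
          [("__UNKNOWN_ENV__", true), ("maze2d", false), ("antmaze", false), ("adroit", false),
           ("gym", false), ("frankakitchen", false), ("calvin", false)]).items := by
  by_cases h1 : "maze2d" = b; · subst h1; decide
  by_cases h2 : "antmaze" = b; · subst h2; decide
  by_cases h3 : "pen" = b; · subst h3; decide
  by_cases h4 : "hammer" = b; · subst h4; decide
  by_cases h5 : "door" = b; · subst h5; decide
  by_cases h6 : "relocate" = b; · subst h6; decide
  by_cases h7 : "halfcheetah" = b; · subst h7; decide
  by_cases h8 : "walker2d" = b; · subst h8; decide
  by_cases h9 : "hopper" = b; · subst h9; decide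
  by_cases h10 : "ant" = b; · subst h10; decide
  by_cases h11 : "kitchen" = b; · subst h11; decide
  by_cases h12 : "calvin" = b; · subst h12; decide
  have e1 : (pvMetaTasks.getD "maze2d" []).contains b = false := by
    simp [pvMetaTasks, PySem.Dict.getD, PySem.Dict.get?, Ne.symm h1]
  have e2 : (pvMetaTasks.getD "antmaze" []).contains b = false := by
    simp [pvMetaTasks, PySem.Dict.getD, PySem.Dict.get?, Ne.symm h2]
  have e3 : (pvMetaTasks.getD "adroit" []).contains b = false := by
    simp [pvMetaTasks, PySem.Dict.getD, PySem.Dict.get?, Ne.symm h3, Ne.symm h4, Ne.symm h5, Ne.symm h6]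
  have e4 : (pvMetaTasks.getD "gym" []).contains b = false := by
    simp [pvMetaTasks, PySem.Dict.getD, PySem.Dict.get?, Ne.symm h7, Ne.symm h8, Ne.symm h9, Ne.symm h10]
  have e5 : (pvMetaTasks.getD "frankakitchen" []).contains b = false := by
    simp [pvMetaTasks, PySem.Dict.getD, PySem.Dict.get?, Ne.symm h11]
  have e6 : (pvMetaTasks.getD "calvin" []).contains b = false := by
    simp [pvMetaTasks, PySem.Dict.getD, PySem.Dict.get?, Ne.symm h12]
  have er : pvRevIndex.get? b = none := by
    simp [pvRevIndex, PySem.Dict.get?]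
    exact ⟨h1, h2, h3, h4, h5, h6, h7, h8, h9, h10, h11, h12⟩
  simp only [show pvMetaTasks.keys = ["maze2d", "antmaze", "adroit", "gym", "frankakitchen", "calvin"] from rfl,
    List.foldl_cons, List.foldl_nil, e1, e2, e3, e4, e5, e6, er, Bool.false_eq_true, if_false]
  decide

-- ===== VERDICT (by name: the statement is the Claim_ definition above) =====
theorem determain_env_spec : Claim_equal_determain_env := by
  intro s _
  unfold Spec_determain_env determain_env determain_env_alt determain_env_type_match
  exact determain_core _
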